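-- pv_equiv track=rewrite | github.com/Traigent/Traigent | scripts/code_analysis/metrics.py | match_tests
-- ===== SOURCE A (Python) =====
-- from typing import Dict, List, Sequence, Set, Tuple
--
-- def match_tests(module: str, imports: Set[str]) -> bool:
--     module_aliases = {module}
--     if module.startswith("traigent."):
--         module_aliases.add(module[len("traigent.") :])
--     else:
--         module_aliases.add(f"traigent.{module}")
--     for imported in imports:
--         if imported in module_aliases:
--             return True
--         if module.startswith(f"{imported}."):
--             return True
--         if any(imported.startswith(f"{alias}.") for alias in module_aliases):
--             return True
--     return False
-- ===== SOURCE B (Python) =====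
-- def match_tests(module, imports):
--     module_aliases = {module}
--     if module.startswith("traigent."):
--         module_aliases.add(module[len("traigent.") :])
--     else:
--         module_aliases.add(f"traigent.{module}")
--
--     def dotted_prefixes(s):
--         # s itself plus every prefix that is cut off right before a '.'
--         return {s} | {s[:i] for i, ch in enumerate(s) if ch == "."}
--
--     module_prefixes = dotted_prefixes(module)
--     return any(
--         imported in module_prefixes
--         or not module_aliases.isdisjoint(dotted_prefixes(imported))
--         for imported in imports
--     )
-- ===== Notes on version B (the rewrite author's own statement) =====
-- stated objective: simpler
-- what changed: Replaces the per-import chain of membership/startswith scans over the alias set by dotted-prefix sets: each string's set of dot-boundary prefixes is built once (the module's reused across all imports) and the three checks collapse to one set membership plus one set intersection (isdisjoint).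
import Mathlib
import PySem

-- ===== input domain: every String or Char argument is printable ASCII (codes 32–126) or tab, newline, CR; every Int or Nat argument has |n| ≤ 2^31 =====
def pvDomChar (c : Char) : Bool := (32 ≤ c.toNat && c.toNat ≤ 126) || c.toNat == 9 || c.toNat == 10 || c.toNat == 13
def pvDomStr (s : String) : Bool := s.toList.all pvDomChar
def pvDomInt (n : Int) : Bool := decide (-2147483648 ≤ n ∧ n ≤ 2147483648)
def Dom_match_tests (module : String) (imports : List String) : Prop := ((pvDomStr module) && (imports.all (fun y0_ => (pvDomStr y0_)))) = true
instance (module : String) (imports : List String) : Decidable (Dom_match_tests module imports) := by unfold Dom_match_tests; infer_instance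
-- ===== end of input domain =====

-- B replaces A's per-import startswith/membership scans by dotted-prefix sets and one
-- set-intersection test per import (objective: simpler; same asymptotic cost).


-- ===== PORT A =====
-- "traigent." as a char list (all string work is done on List Char via PySem.Chars)
def pvTra : List Char := ['t', 'r', 'a', 'i', 'g', 'e', 'n', 't', '.']

-- module_aliases = {module}; then add module[len("traigent."):] or "traigent." + module
def pvAliasesA (m : List Char) : PySem.Set (List Char) :=
  let s := PySem.Set.ofList [m]
  if PySem.Chars.startswith m pvTra then
    s.add (PySem.Chars.slice m (some 9) none)
  else
    s.add (pvTra ++ m)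

-- the for-loop over imports with its three early returns
def pvLoopA (m : List Char) (al : PySem.Set (List Char)) : List (List Char) → Bool
  | [] => false
  | imp :: rest =>
    if al.contains imp then true
    else if PySem.Chars.startswith m (imp ++ ['.']) then true
    else if al.any (fun ali => PySem.Chars.startswith imp (ali ++ ['.'])) then true
    else pvLoopA m al rest

def match_tests (module : String) (imports : List String) : Bool :=
  pvLoopA module.toList (pvAliasesA module.toList) (imports.map String.toList)

-- ===== PORT B =====
def pvAliasesB (m : List Char) : PySem.Set (List Char) :=
  let s := PySem.Set.ofList [m]
  if PySem.Chars.startswith m pvTra then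
    s.add (PySem.Chars.slice m (some 9) none)
  else
    s.add (pvTra ++ m)

-- dotted_prefixes(s) = {s} | {s[:i] for i, ch in enumerate(s) if ch == "."}
def pvDotted (s : List Char) : PySem.Set (List Char) :=
  (PySem.Set.ofList [s]).union
    (PySem.Set.ofList
      (((PySem.List.enumerate s).filter (fun p => p.2 == '.')).map
        (fun p => PySem.Chars.slice s none (some p.1))))

def match_tests_alt (module : String) (imports : List String) : Bool :=
  let m := module.toList
  let al := pvAliasesB m
  let mp := pvDotted m
  (imports.map String.toList).any (fun imp =>
    mp.contains imp || !(al.isdisjoint (pvDotted imp)))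

-- ===== PRECONDITION & SPEC =====
def Spec_match_tests (module : String) (imports : List String) (out : Bool) : Prop := out = match_tests_alt module imports
instance (module : String) (imports : List String) (out : Bool) : Decidable (Spec_match_tests module imports out) := by unfold Spec_match_tests; infer_instance

-- ===== CLAIM (what is proved, stated in full; the proofs are below) =====
def Claim_equal_match_tests : Prop := ∀ (module : String) (imports : List String), Dom_match_tests module imports → Spec_match_tests module imports (match_tests module imports)

-- ===== LEMMAS AND PROOFS =====

-- a is a take-at-a-dot prefix of s iff a followed by '.' is a prefix of s
theorem pv_take_dot_iff (s a : List Char) :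
    (∃ i, ∃ _ : i < s.length, s[i] = '.' ∧ a = s.take i) ↔ (a ++ ['.']) <+: s := by
  constructor
  · rintro ⟨i, hi, hdot, rfl⟩
    have h1 : s.take i ++ ['.'] = s.take (i+1) := by
      rw [List.take_add_one, List.getElem?_eq_getElem hi, hdot]; rfl
    rw [h1]; exact List.take_prefix _ _
  · rintro ⟨t, ht⟩
    subst ht
    have hlt : a.length < (a ++ ['.'] ++ t).length := by simp
    refine ⟨a.length, hlt, ?_, ?_⟩
    · simp [List.getElem_append_right (le_refl a.length)]
    · simp

-- membership in dotted_prefixes s: s itself, or a prefix of s cut right before a '.'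
theorem pv_mem_dotted (s a : List Char) :
    a ∈ pvDotted s ↔ a = s ∨ (a ++ ['.']) <+: s := by
  rw [pvDotted, PySem.Set.mem_union, PySem.Set.mem_ofList, PySem.Set.mem_ofList, ← pv_take_dot_iff]
  simp only [PySem.List.enumerate_eq_zipIdx_map, List.mem_singleton, List.mem_map,
    List.mem_filter, List.mem_zipIdx_iff_getElem?]
  constructor
  · rintro (rfl | ⟨⟨i, c⟩, ⟨⟨hg, hc⟩, rfl⟩⟩)
    · exact Or.inl rfl
    · refine Or.inr ?_
      obtain ⟨⟨x, k⟩, hk, heq⟩ := hg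
      obtain ⟨h1, h2⟩ := Prod.mk.injEq .. ▸ heq
      subst h2
      have hik : i = (k : Int) := by omega
      subst hik
      have hklt : k < s.length := (List.getElem?_eq_some_iff.mp hk).1
      refine ⟨k, hklt, ?_, ?_⟩
      · obtain ⟨hh, hx⟩ := List.getElem?_eq_some_iff.mp hk
        simp at hc
        rw [hx]; exact hc
      · rw [PySem.Chars.slice_eq_listSlice]
        simpa using PySem.List.slice_to s (b := (k : Int)) (Int.natCast_nonneg k)
  · rintro (rfl | ⟨i, hi, hdot, rfl⟩)
    · exact Or.inl rfl
    · refine Or.inr ⟨((i : Int), s[i]), ⟨⟨(s[i], i), by simp, by simp⟩, by simp [hdot]⟩, ?_⟩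
      rw [PySem.Chars.slice_eq_listSlice]
      simpa using PySem.List.slice_to s (b := (i : Int)) (Int.natCast_nonneg i)

-- the module is one of its own aliases
theorem pv_self_mem_aliasesA (m : List Char) : m ∈ pvAliasesA m := by
  unfold pvAliasesA
  split <;> simp [PySem.Set.mem_add, PySem.Set.mem_ofList]

-- the per-import condition of A equals the per-import condition of B
theorem pv_cond_eq (m imp : List Char) :
    ((pvAliasesA m).contains imp
      || PySem.Chars.startswith m (imp ++ ['.'])
      || (pvAliasesA m).any (fun ali => PySem.Chars.startswith imp (ali ++ ['.'])))
    = ((pvDotted m).contains imp || !((pvAliasesA m).isdisjoint (pvDotted imp))) := by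
  rw [Bool.eq_iff_iff]
  simp only [Bool.or_eq_true, Bool.not_eq_true', Bool.eq_false_iff, Ne,
    PySem.Set.contains_iff, PySem.Chars.startswith_iff, List.any_eq_true,
    PySem.Set.isdisjoint_iff, pv_mem_dotted]
  push_neg
  constructor
  · rintro ((h | h) | ⟨x, hx, hsw⟩)
    · exact Or.inr ⟨imp, h, Or.inl rfl⟩
    · exact Or.inl (Or.inr h)
    · exact Or.inr ⟨x, hx, Or.inr hsw⟩
  · rintro ((rfl | h) | ⟨x, hx, (rfl | hsw)⟩)
    · exact Or.inl (Or.inl (pv_self_mem_aliasesA imp))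
    · exact Or.inl (Or.inr h)
    · exact Or.inl (Or.inl hx)
    · exact Or.inr ⟨x, hx, hsw⟩

-- A's loop is the any-fold of the common condition
theorem pv_loopA_eq_any (m : List Char) (l : List (List Char)) :
    pvLoopA m (pvAliasesA m) l
      = l.any (fun imp => (pvDotted m).contains imp
          || !((pvAliasesA m).isdisjoint (pvDotted imp))) := by
  induction l with
  | nil => rfl
  | cons imp rest ih =>
    have h := pv_cond_eq m imp
    simp only [pvLoopA, List.any_cons, ← h]
    cases h1 : (pvAliasesA m).contains imp <;>
      cases h2 : PySem.Chars.startswith m (imp ++ ['.']) <;>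
        cases h3 : (pvAliasesA m).any (fun ali => PySem.Chars.startswith imp (ali ++ ['.'])) <;>
          simp [ih]

-- ===== VERDICT (by name: the statement is the Claim_ definition above) =====
theorem match_tests_spec : Claim_equal_match_tests := by
  intro module imports _
  exact pv_loopA_eq_any module.toList (imports.map String.toList)
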